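-- pv_equiv track=rewrite | github.com/oils-for-unix/oils | opy/_regtest/src/core/glob_.py | LooksLikeGlob
-- ===== SOURCE A (Python) =====
-- def LooksLikeGlob(s):
--   """
--   TODO: Reference lib/glob /   glob_pattern functions in bash
--   grep glob_pattern lib/glob/*
--
--   NOTE: Dash has CTLESC = -127.
--   Does that mean a string is an array of ints or shorts?  Not bytes?
--   How does it handle unicode/utf-8 then?
--   Nope it's using it with char* p.
--   So it dash only ASCII or what?  TODO: test it
--
--   Still need this for slow path / fast path of prefix/suffix/patsub ops.
--   """
--   left_bracket = False
--   i = 0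
--   n = len(s)
--   while i < n:
--     c = s[i]
--     if c == '\\':
--       i += 1
--     elif c == '*' or c == '?':
--       return True
--     elif c == '[':
--       left_bracket = True
--     elif c == ']' and left_bracket:
--       return True
--     i += 1
--   return False
-- ===== SOURCE B (Python) =====
-- def LooksLikeGlob(s):
--   # Strip escape pairs once, then use closed membership/position tests.
--   t = []
--   i = 0
--   n = len(s)
--   while i < n:
--     if s[i] == '\\':
--       i += 2
--     else:
--       t.append(s[i])
--       i += 1
--   t = ''.join(t)
--   if '*' in t or '?' in t:
--     return True
--   if '[' in t:
--     return ']' in t[t.index('[') + 1:]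
--   return False
-- ===== Notes on version B (the rewrite author's own statement) =====
-- stated objective: simpler
-- what changed: Replaces the single stateful left_bracket scan with a preprocessing pass that drops escape pairs followed by plain membership/position tests on the effective string.
import Mathlib
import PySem

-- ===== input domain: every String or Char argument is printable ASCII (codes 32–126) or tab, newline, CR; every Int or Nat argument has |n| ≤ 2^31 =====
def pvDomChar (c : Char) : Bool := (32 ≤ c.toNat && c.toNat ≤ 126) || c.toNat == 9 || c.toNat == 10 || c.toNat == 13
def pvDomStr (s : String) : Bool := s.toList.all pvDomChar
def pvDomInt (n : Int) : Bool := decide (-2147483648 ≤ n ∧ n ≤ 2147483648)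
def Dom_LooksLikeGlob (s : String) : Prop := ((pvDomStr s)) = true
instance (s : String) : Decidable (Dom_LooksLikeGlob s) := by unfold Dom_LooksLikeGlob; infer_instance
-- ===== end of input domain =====

-- B replaces A's stateful left_bracket index loop by an escape-stripping pass plus membership/position tests (simpler decomposition).

-- ===== PORT A =====
-- A's while loop over index i with state left_bracket, as the obvious structural
-- recursion over the remaining characters; on '\\' both i += 1 steps fire, so the
-- backslash and the following character are consumed together.
def pvLoopA : List Char → Bool → Bool
  | [], _ => false
  | c :: rest, lb =>
    if c == '\\' then
      match rest with
      | [] => false                      -- trailing backslash: i = n, loop ends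
      | _ :: rest' => pvLoopA rest' lb
    else if c == '*' || c == '?' then true
    else if c == '[' then pvLoopA rest true
    else if c == ']' && lb then true
    else pvLoopA rest lb

def LooksLikeGlob (s : String) : Bool := pvLoopA s.toList false

-- ===== PORT B =====
-- Source B's first loop: drop each backslash together with the character after it
def pvStripEsc : List Char → List Char
  | [] => []
  | c :: rest =>
    if c == '\\' then
      match rest with
      | [] => []
      | _ :: rest' => pvStripEsc rest'
    else c :: pvStripEsc rest

-- Source B's closing tests: '*' in t / '?' in t / '[' in t and ']' in t[t.index('[')+1:]
def LooksLikeGlob_alt (s : String) : Bool :=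
  let t := pvStripEsc s.toList
  if t.contains '*' || t.contains '?' then true
  else if t.contains '[' then (t.drop (t.idxOf '[' + 1)).contains ']'
  else false

-- ===== PRECONDITION & SPEC =====
def Spec_LooksLikeGlob (s : String) (out : Bool) : Prop := out = LooksLikeGlob_alt s
instance (s : String) (out : Bool) : Decidable (Spec_LooksLikeGlob s out) := by unfold Spec_LooksLikeGlob; infer_instance

-- ===== CLAIM (what is proved, stated in full; the proofs are below) =====
def Claim_equal_LooksLikeGlob : Prop := ∀ (s : String), Dom_LooksLikeGlob s → Spec_LooksLikeGlob s (LooksLikeGlob s)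

-- ===== LEMMAS AND PROOFS =====

-- one-step unfolding lemmas for the cons case of each recursion
theorem pvLoopA_cons (c : Char) (rest : List Char) (lb : Bool) :
    pvLoopA (c :: rest) lb =
      if c == '\\' then (match rest with | [] => false | _ :: rest' => pvLoopA rest' lb)
      else if c == '*' || c == '?' then true
      else if c == '[' then pvLoopA rest true
      else if c == ']' && lb then true
      else pvLoopA rest lb := by rw [pvLoopA.eq_def]

theorem pvStripEsc_cons (c : Char) (rest : List Char) :
    pvStripEsc (c :: rest) =
      if c == '\\' then (match rest with | [] => [] | _ :: rest' => pvStripEsc rest')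
      else c :: pvStripEsc rest := by rw [pvStripEsc.eq_def]

-- A's state machine run directly on the escape-free string
def pvAux : List Char → Bool → Bool
  | [], _ => false
  | c :: rest, lb =>
    if c == '*' || c == '?' then true
    else if c == '[' then pvAux rest true
    else if c == ']' && lb then true
    else pvAux rest lb

theorem pvAux_cons (c : Char) (rest : List Char) (lb : Bool) :
    pvAux (c :: rest) lb =
      if c == '*' || c == '?' then true
      else if c == '[' then pvAux rest true
      else if c == ']' && lb then true
      else pvAux rest lb := by rw [pvAux.eq_def]

theorem pvLoopA_eq_aux_strip (l : List Char) (lb : Bool) :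
    pvLoopA l lb = pvAux (pvStripEsc l) lb := by
  induction l using pvStripEsc.induct generalizing lb with
  | case1 => rfl
  | case2 c hc => simp [pvLoopA_cons, pvStripEsc_cons, hc, pvAux]
  | case3 c hc x rest' ih => simp [pvLoopA_cons, pvStripEsc_cons, hc, ih]
  | case4 c rest hc ih =>
    simp only [Bool.not_eq_true] at hc
    rcases eq_or_ne c '*' with h | h1
    · subst h; simp [pvLoopA_cons, pvStripEsc_cons, pvAux_cons]
    rcases eq_or_ne c '?' with h | h2
    · subst h; simp [pvLoopA_cons, pvStripEsc_cons, pvAux_cons]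
    rcases eq_or_ne c '[' with h | h3
    · subst h; simp [pvLoopA_cons, pvStripEsc_cons, pvAux_cons, ih]
    rcases eq_or_ne c ']' with h | h4
    · subst h; cases lb <;> simp [pvLoopA_cons, pvStripEsc_cons, pvAux_cons, ih]
    simp [pvLoopA_cons, pvStripEsc_cons, pvAux_cons, hc, h1, h2, h3, h4, ih]

theorem pvAux_true (t : List Char) :
    pvAux t true = (t.contains '*' || t.contains '?' || t.contains ']') := by
  induction t with
  | nil => rfl
  | cons c rest ih =>
    rcases eq_or_ne c '*' with h | h1
    · subst h; simp [pvAux_cons]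
    rcases eq_or_ne c '?' with h | h2
    · subst h; simp [pvAux_cons]
    rcases eq_or_ne c '[' with h | h3
    · subst h; simp [pvAux_cons, ih]
    rcases eq_or_ne c ']' with h | h4
    · subst h; simp [pvAux_cons]
    simp [pvAux_cons, h1, h2, h3, h4, Ne.symm h1, Ne.symm h2, Ne.symm h4, ih]

theorem pvAux_false (t : List Char) :
    pvAux t false =
      (if t.contains '*' || t.contains '?' then true
       else if t.contains '[' then (t.drop (t.idxOf '[' + 1)).contains ']'
       else false) := by
  induction t with
  | nil => rfl
  | cons c rest ih =>
    rcases eq_or_ne c '*' with h | h1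
    · subst h; simp [pvAux_cons]
    rcases eq_or_ne c '?' with h | h2
    · subst h; simp [pvAux_cons]
    rcases eq_or_ne c '[' with h | h3
    · subst h
      have hb : pvAux ('[' :: rest) false = pvAux rest true := by
        simp [pvAux_cons]
      rw [hb, pvAux_true]
      simp [List.idxOf_cons, Ne.symm h1, Ne.symm h2]
    have hstep : pvAux (c :: rest) false = pvAux rest false := by
      rcases eq_or_ne c ']' with h | h4 <;> simp [pvAux_cons, h1, h2, h3, *]
    rw [hstep, ih]
    by_cases h4 : '*' ∈ rest
    · simp [h4, Ne.symm h1]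
    by_cases h5 : '?' ∈ rest
    · simp [h5, Ne.symm h1, Ne.symm h2]
    by_cases h6 : '[' ∈ rest
    · have hcf : (c == '[') = false := by simp [h3]
      simp [h4, h5, h6, Ne.symm h1, Ne.symm h2, Ne.symm h3, hcf, List.idxOf_cons]
    · simp [h4, h5, h6, Ne.symm h1, Ne.symm h2, Ne.symm h3]

-- ===== VERDICT (by name: the statement is the Claim_ definition above) =====
theorem LooksLikeGlob_spec : Claim_equal_LooksLikeGlob := by
  intro s _
  show LooksLikeGlob s = LooksLikeGlob_alt s
  unfold LooksLikeGlob LooksLikeGlob_alt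
  rw [pvLoopA_eq_aux_strip, pvAux_false]
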